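-- pv_equiv track=rewrite | github.com/Thunderpk12/Plugin-Vs-Code | python-vuln-scanner/backend/authentication_analyzer.py | _has_high_entropy
-- ===== SOURCE A (Python) =====
-- def _has_high_entropy(s: str) -> bool:
--     """Calcula se string tem alta entropia (possível secret)"""
--     if not s:
--         return False
--
--     # Contar tipos de caracteres
--     has_upper = any(c.isupper() for c in s)
--     has_lower = any(c.islower() for c in s)
--     has_digit = any(c.isdigit() for c in s)
--     has_special = any(not c.isalnum() for c in s)
--
--     # Se tem pelo menos 3 tipos diferentes, consideramos alta entropia
--     char_types = sum([has_upper, has_lower, has_digit, has_special])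
--     return char_types >= 3
-- ===== SOURCE B (Python) =====
-- def _has_high_entropy(s: str) -> bool:
--     """Single pass: update four flags per character and return True as soon as
--     three character classes have been seen."""
--     has_upper = has_lower = has_digit = has_special = False
--     for c in s:
--         if c.isupper():
--             has_upper = True
--         if c.islower():
--             has_lower = True
--         if c.isdigit():
--             has_digit = True
--         if not c.isalnum():
--             has_special = True
--         if has_upper + has_lower + has_digit + has_special >= 3:
--             return True
--     return False
-- ===== Notes on version B (the rewrite author's own statement) =====
-- stated objective: alternative
-- what changed: Replaces the four independent any() passes over the string with one single-pass loop maintaining four boolean flags that returns True early as soon as three classes are seen.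
import Mathlib
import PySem

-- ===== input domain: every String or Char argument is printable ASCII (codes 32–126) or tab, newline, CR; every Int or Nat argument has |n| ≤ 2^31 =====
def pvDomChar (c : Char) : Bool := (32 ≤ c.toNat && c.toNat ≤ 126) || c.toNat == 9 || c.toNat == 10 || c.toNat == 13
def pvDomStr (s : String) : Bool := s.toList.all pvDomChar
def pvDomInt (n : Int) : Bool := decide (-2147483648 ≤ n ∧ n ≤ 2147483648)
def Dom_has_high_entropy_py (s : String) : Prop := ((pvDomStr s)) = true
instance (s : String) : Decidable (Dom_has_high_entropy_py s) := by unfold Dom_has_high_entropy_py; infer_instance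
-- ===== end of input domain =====

-- B replaces A's four independent any() passes by one single-pass loop over the
-- string with four boolean flags and an early exit once three classes are seen
-- (objective: alternative decomposition; same asymptotic cost).

-- ===== PORT A =====
def has_high_entropy_py (s : String) : Bool :=
  if s.toList.isEmpty then false
  else
    let has_upper := s.toList.any (fun c => PySem.Chars.isupper c)
    let has_lower := s.toList.any (fun c => PySem.Chars.islower c)
    let has_digit := s.toList.any (fun c => PySem.Chars.isdigit c)
    let has_special := s.toList.any (fun c => !PySem.Chars.isalnum c)
    let char_types : Nat :=
      (cond has_upper 1 0) + (cond has_lower 1 0) + (cond has_digit 1 0) + (cond has_special 1 0)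
    decide (3 ≤ char_types)

-- ===== PORT B =====
def pvCnt (a b c d : Bool) : Nat :=
  (cond a 1 0) + (cond b 1 0) + (cond c 1 0) + (cond d 1 0)

def pvAltLoop : List Char → Bool → Bool → Bool → Bool → Bool
  | [], _, _, _, _ => false
  | c :: cs, up, lo, dg, sp =>
    let up := up || PySem.Chars.isupper c
    let lo := lo || PySem.Chars.islower c
    let dg := dg || PySem.Chars.isdigit c
    let sp := sp || !PySem.Chars.isalnum c
    if 3 ≤ pvCnt up lo dg sp then true else pvAltLoop cs up lo dg sp

def has_high_entropy_py_alt (s : String) : Bool :=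
  pvAltLoop s.toList false false false false

-- ===== PRECONDITION & SPEC =====
def Spec_has_high_entropy_py (s : String) (out : Bool) : Prop := out = has_high_entropy_py_alt s
instance (s : String) (out : Bool) : Decidable (Spec_has_high_entropy_py s out) := by unfold Spec_has_high_entropy_py; infer_instance

-- ===== CLAIM (what is proved, stated in full; the proofs are below) =====
def Claim_equal_has_high_entropy_py : Prop := ∀ (s : String), Dom_has_high_entropy_py s → Spec_has_high_entropy_py s (has_high_entropy_py s)

-- ===== LEMMAS AND PROOFS =====

theorem pvCnt_mono (a b c d x y z w : Bool) :
    pvCnt a b c d ≤ pvCnt (a || x) (b || y) (c || z) (d || w) := by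
  cases a <;> cases b <;> cases c <;> cases d <;> cases x <;> cases y <;> cases z <;> cases w <;> decide

-- Loop invariant: as long as fewer than three flags are set on entry, the early-exit
-- loop computes exactly "final flag count ≥ 3".
theorem pvAltLoop_eq (cs : List Char) : ∀ up lo dg sp, pvCnt up lo dg sp < 3 →
    pvAltLoop cs up lo dg sp =
      decide (3 ≤ pvCnt (up || cs.any (fun c => PySem.Chars.isupper c))
                        (lo || cs.any (fun c => PySem.Chars.islower c))
                        (dg || cs.any (fun c => PySem.Chars.isdigit c))
                        (sp || cs.any (fun c => !PySem.Chars.isalnum c))) := by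
  induction cs with
  | nil =>
    intro up lo dg sp h
    simp [pvAltLoop]
    omega
  | cons c cs ih =>
    intro up lo dg sp h
    simp only [pvAltLoop, List.any_cons, ← Bool.or_assoc]
    split
    · rename_i hge
      have := le_trans hge (pvCnt_mono _ _ _ _ (cs.any (fun c => PySem.Chars.isupper c))
        (cs.any (fun c => PySem.Chars.islower c)) (cs.any (fun c => PySem.Chars.isdigit c))
        (cs.any (fun c => !PySem.Chars.isalnum c)))
      simp [this]
    · rename_i hlt
      exact ih _ _ _ _ (by omega)

-- ===== VERDICT (by name: the statement is the Claim_ definition above) =====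
theorem has_high_entropy_py_spec : Claim_equal_has_high_entropy_py := by
  intro s _
  unfold Spec_has_high_entropy_py has_high_entropy_py has_high_entropy_py_alt
  cases hs : s.toList with
  | nil => simp [pvAltLoop]
  | cons c cs =>
    rw [pvAltLoop_eq (c :: cs) false false false false (by decide)]
    simp [pvCnt]
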